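-- pv_equiv track=rewrite | github.com/jchy20/how-much-backtrack | reasoning-gym/reasoning_gym/arc/arc_1d_tasks.py | transform_reflect_block_with_border_pixel
-- ===== SOURCE A (Python) =====
-- def transform_reflect_block_with_border_pixel(input_grid: list[int]) -> list[int]:
--     size = len(input_grid)
--     output = input_grid.copy()
--
--     # Find the block by looking for a sequence with a different color on either end
--     block_start = None
--     block_end = None
--     block_colors = []
--
--     # Scan through the grid to find potential blocks
--     i = 0
--     while i < size:
--         if input_grid[i] != 0:  # Found a non-zero pixel
--             # Check if this could be the start of a block
--             if i + 1 < size and input_grid[i + 1] != 0: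
--                 # Found potential block start
--                 block_start = i
--                 block_colors = [input_grid[i]]
--
--                 # Find the end of the block
--                 j = i + 1
--                 while j < size and input_grid[j] != 0:
--                     block_colors.append(input_grid[j])
--                     j += 1
--                 block_end = j - 1
--
--                 # Check if this is a valid block with a border pixel
--                 if len(block_colors) >= 2 and (block_colors[0] != block_colors[1] or block_colors[-1] != block_colors[-2]):
--                     # Found a valid block with border pixel
--                     break
--                 else:
--                     # Not a valid block, continue searching
--                     block_start = None
--                     block_end = None
--                     block_colors = []
--                     i = j
--             else:
--                 i += 1
--         else:
--             i += 1
--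
--     # If we found a valid block, reflect it
--     if block_start is not None and block_end is not None:
--         # Reverse the block colors
--         reversed_colors = block_colors[::-1]
--
--         # Write the reversed block back to the same position
--         for i, color in enumerate(reversed_colors):
--             output[block_start + i] = color
--
--     return output
-- ===== SOURCE B (Python) =====
-- def transform_reflect_block_with_border_pixel(input_grid: list[int]) -> list[int]:
--     g = input_grid
--     # Pass 1: collect maximal contiguous non-zero runs as half-open (start, end) pairs
--     runs = []
--     start = None
--     for idx, v in enumerate(g):
--         if v != 0:
--             if start is None:
--                 start = idx
--         elif start is not None:
--             runs.append((start, idx))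
--             start = None
--     if start is not None:
--         runs.append((start, len(g)))
--     # Pass 2: reverse the first run of length >= 2 that has a border pixel
--     for a, b in runs:
--         if b - a >= 2 and (g[a] != g[a + 1] or g[b - 1] != g[b - 2]):
--             return g[:a] + g[a:b][::-1] + g[b:]
--     return list(g)
-- ===== Notes on version B (the rewrite author's own statement) =====
-- stated objective: alternative
-- what changed: A's single index-walking scan with sentinel block state, a nested element-appending collection loop and element-by-element write-back is replaced by two separate passes: a state-machine over enumerate that records all maximal non-zero runs as (start,end) pairs, then selection of the first qualifying run and one slice-reversal splice.
import Mathlib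
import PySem

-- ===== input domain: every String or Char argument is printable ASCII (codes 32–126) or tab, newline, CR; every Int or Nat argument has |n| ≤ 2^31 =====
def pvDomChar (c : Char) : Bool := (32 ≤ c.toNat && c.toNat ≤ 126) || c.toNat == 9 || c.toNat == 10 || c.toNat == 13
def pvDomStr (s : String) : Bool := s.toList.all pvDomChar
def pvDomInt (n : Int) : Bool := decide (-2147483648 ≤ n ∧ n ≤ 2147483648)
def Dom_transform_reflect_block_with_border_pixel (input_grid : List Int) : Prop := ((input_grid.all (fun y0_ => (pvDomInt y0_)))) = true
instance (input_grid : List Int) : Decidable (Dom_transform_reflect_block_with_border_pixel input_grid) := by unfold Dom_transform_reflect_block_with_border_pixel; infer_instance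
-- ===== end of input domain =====

-- B replaces A's sentinel-state scan by two passes (collect all maximal non-zero runs, then splice-reverse the first qualifying one); return values proved equal.

-- ===== PORT A =====
-- inner 'while j < size and input_grid[j] != 0' loop (indices are in range where Python reads, so getD is exact)
def pvCollect (g : List Int) (j : Nat) (acc : List Int) : List Int × Nat :=
  if h : j < g.length ∧ g.getD j 0 ≠ 0 then pvCollect g (j + 1) (acc ++ [g.getD j 0]) else (acc, j)
termination_by g.length - j
decreasing_by omega

theorem pvCollect_snd_ge (g : List Int) (j : Nat) (acc : List Int) : j ≤ (pvCollect g j acc).2 := by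
  unfold pvCollect
  split
  · exact le_trans (Nat.le_succ j) (pvCollect_snd_ge g (j + 1) _)
  · exact le_refl j
termination_by g.length - j
decreasing_by simp_all; omega

-- 'len(block_colors) >= 2 and (block_colors[0] != block_colors[1] or block_colors[-1] != block_colors[-2])'
def pvGood (colors : List Int) : Bool :=
  decide (2 ≤ colors.length) &&
    (decide (colors.getD 0 0 ≠ colors.getD 1 0) ||
     decide (colors.getD (colors.length - 1) 0 ≠ colors.getD (colors.length - 2) 0))

-- outer 'while i < size' search loop; returns (block_start, block_colors) of the block found, if any
def pvScan (g : List Int) (i : Nat) : Option (Nat × List Int) :=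
  if _h : i < g.length then
    if g.getD i 0 ≠ 0 then
      if i + 1 < g.length ∧ g.getD (i + 1) 0 ≠ 0 then
        let r := pvCollect g (i + 1) [g.getD i 0]
        if pvGood r.1 then some (i, r.1) else pvScan g r.2
      else pvScan g (i + 1)
    else pvScan g (i + 1)
  else none
termination_by g.length - i
decreasing_by
  · have := pvCollect_snd_ge g (i + 1) [g.getD i 0]; omega
  · omega
  · omega

-- 'for i, color in enumerate(reversed_colors): output[block_start + i] = color'
def pvWrite (out : List Int) (pos : Nat) : List Int → List Int
  | [] => out
  | c :: cs => pvWrite (out.set pos c) (pos + 1) cs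

def transform_reflect_block_with_border_pixel (input_grid : List Int) : List Int :=
  match pvScan input_grid 0 with
  | some (s, colors) => pvWrite input_grid s colors.reverse
  | none => input_grid

-- ===== PORT B =====
-- one step of the 'for idx, v in enumerate(g)' state machine (enumerate indices are nonnegative, so Nat zipIdx is exact)
def pvRunsStep (st : List (Nat × Nat) × Option Nat) (p : Int × Nat) : List (Nat × Nat) × Option Nat :=
  if p.1 ≠ 0 then
    match st.2 with
    | none => (st.1, some p.2)
    | some a => (st.1, some a)
  else
    match st.2 with
    | some a => (st.1 ++ [(a, p.2)], none)
    | none => st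

-- 'if start is not None: runs.append((start, len(g)))'
def pvClose (n : Nat) : List (Nat × Nat) × Option Nat → List (Nat × Nat)
  | (runs, some a) => runs ++ [(a, n)]
  | (runs, none) => runs

def pvRuns (g : List Int) : List (Nat × Nat) :=
  pvClose g.length (g.zipIdx.foldl pvRunsStep ([], none))

-- 'b - a >= 2 and (g[a] != g[a+1] or g[b-1] != g[b-2])' (indices in range where Python reads)
def pvGoodRun (g : List Int) (r : Nat × Nat) : Bool :=
  decide (2 ≤ r.2 - r.1) &&
    (decide (g.getD r.1 0 ≠ g.getD (r.1 + 1) 0) ||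
     decide (g.getD (r.2 - 1) 0 ≠ g.getD (r.2 - 2) 0))

-- slices g[:a], g[a:b], g[b:] with 0 ≤ a ≤ b ≤ len(g), so take/drop are exact
def transform_reflect_block_with_border_pixel_alt (input_grid : List Int) : List Int :=
  match (pvRuns input_grid).find? (pvGoodRun input_grid) with
  | some (a, b) =>
      input_grid.take a ++ ((input_grid.drop a).take (b - a)).reverse ++ input_grid.drop b
  | none => input_grid

-- ===== PRECONDITION & SPEC =====
def Spec_transform_reflect_block_with_border_pixel (input_grid : List Int) (out : List Int) : Prop := out = transform_reflect_block_with_border_pixel_alt input_grid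
instance (input_grid : List Int) (out : List Int) : Decidable (Spec_transform_reflect_block_with_border_pixel input_grid out) := by unfold Spec_transform_reflect_block_with_border_pixel; infer_instance

-- ===== CLAIM (what is proved, stated in full; the proofs are below) =====
def Claim_equal_transform_reflect_block_with_border_pixel : Prop := ∀ (input_grid : List Int), Dom_transform_reflect_block_with_border_pixel input_grid → Spec_transform_reflect_block_with_border_pixel input_grid (transform_reflect_block_with_border_pixel input_grid)

-- ===== LEMMAS AND PROOFS =====

-- common reference: the maximal non-zero runs of xs, offset by s, as half-open (start, end) pairs
def runsL : List Int → Nat → List (Nat × Nat)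
  | [], _ => []
  | x :: xs, s =>
    if x = 0 then runsL xs (s + 1)
    else (s, s + 1 + (xs.takeWhile (fun y => y ≠ 0)).length) ::
         runsL (xs.dropWhile (fun y => y ≠ 0)) (s + 1 + (xs.takeWhile (fun y => y ≠ 0)).length)
termination_by xs => xs.length
decreasing_by
  all_goals simp only [List.length_cons]
  · omega
  · exact Nat.lt_succ_of_le (List.length_dropWhile_le _ xs)

theorem takeWhile_dropWhile_len (xs : List Int) (p : Int → Bool) :
    (xs.takeWhile p).length + (xs.dropWhile p).length = xs.length := by
  conv_rhs => rw [← List.takeWhile_append_dropWhile (p := p) (l := xs)]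
  rw [List.length_append]

theorem runsL_bounds (xs : List Int) (s : Nat) (r : Nat × Nat) (hr : r ∈ runsL xs s) :
    s ≤ r.1 ∧ r.1 < r.2 ∧ r.2 ≤ s + xs.length := by
  induction xs, s using runsL.induct generalizing r with
  | case1 s => simp [runsL] at hr
  | case2 xs s ih =>
      rw [runsL, if_pos rfl] at hr
      have := ih r hr
      simp only [List.length_cons]; omega
  | case3 x xs s hx ih =>
      rw [runsL, if_neg hx] at hr
      have htd := takeWhile_dropWhile_len xs (fun y => y ≠ 0)
      rcases List.mem_cons.mp hr with h | h
      · subst h; simp only [List.length_cons]; omega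
      · have := ih r h
        simp only [List.length_cons]; omega

theorem fold_runs (xs : List Int) : ∀ (s : Nat) (runs : List (Nat × Nat)),
    (pvClose (s + xs.length) ((xs.zipIdx s).foldl pvRunsStep (runs, none)) = runs ++ runsL xs s)
    ∧ ∀ a : Nat, pvClose (s + xs.length) ((xs.zipIdx s).foldl pvRunsStep (runs, some a))
        = runs ++ (a, s + (xs.takeWhile (fun y => y ≠ 0)).length)
            :: runsL (xs.dropWhile (fun y => y ≠ 0)) (s + (xs.takeWhile (fun y => y ≠ 0)).length) := by
  induction xs with
  | nil =>
      intro s runs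
      exact ⟨by simp [pvClose, runsL], fun a => by simp [pvClose, runsL]⟩
  | cons x xs ih =>
      intro s runs
      have hlen : s + (x :: xs).length = (s + 1) + xs.length := by
        simp only [List.length_cons]; omega
      by_cases hx : x = 0
      · subst hx
        have hstep : ∀ st : List (Nat × Nat) × Option Nat,
            pvRunsStep st ((0 : Int), s) = (pvClose s st, none) := by
          intro st; rcases st with ⟨rs, _ | a⟩ <;> simp [pvRunsStep, pvClose]
        constructor
        · rw [List.zipIdx_cons, List.foldl_cons, hstep, pvClose, hlen, (ih (s + 1) runs).1,
            runsL, if_pos rfl]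
        · intro a
          rw [List.zipIdx_cons, List.foldl_cons, hstep, pvClose, hlen,
            (ih (s + 1) (runs ++ [(a, s)])).1]
          simp [runsL]
      · have hstep : ∀ (st : List (Nat × Nat) × Option Nat),
            pvRunsStep st (x, s) = (st.1, some (st.2.getD s)) := by
          intro st; rcases st with ⟨rs, _ | a⟩ <;> simp [pvRunsStep, hx]
        have ht : (x :: xs).takeWhile (fun y => y ≠ 0) = x :: xs.takeWhile (fun y => y ≠ 0) := by
          simp [hx]
        have hd : (x :: xs).dropWhile (fun y => y ≠ 0) = xs.dropWhile (fun y => y ≠ 0) := by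
          simp [hx]
        constructor
        · rw [List.zipIdx_cons, List.foldl_cons, hstep, hlen]
          simp only [Option.getD]
          rw [(ih (s + 1) runs).2 s, runsL, if_neg hx]
        · intro a
          rw [List.zipIdx_cons, List.foldl_cons, hstep, hlen]
          simp only [Option.getD]
          rw [(ih (s + 1) runs).2 a, ht, hd]
          simp only [List.length_cons]
          have harith : s + ((xs.takeWhile (fun y => y ≠ 0)).length + 1)
              = s + 1 + (xs.takeWhile (fun y => y ≠ 0)).length := by omega
          rw [harith]

theorem pvRuns_eq (g : List Int) : pvRuns g = runsL g 0 := by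
  have h := (fold_runs g 0 []).1
  simpa [pvRuns] using h

theorem pvCollect_eq (g : List Int) (j : Nat) (acc : List Int) :
    pvCollect g j acc = (acc ++ (g.drop j).takeWhile (fun y => y ≠ 0),
                         j + ((g.drop j).takeWhile (fun y => y ≠ 0)).length) := by
  unfold pvCollect
  split
  · next h =>
      obtain ⟨hj, hv⟩ := h
      have hget : g.getD j 0 = g[j] := List.getD_eq_getElem g 0 hj
      have hdrop : g.drop j = g[j] :: g.drop (j + 1) := List.drop_eq_getElem_cons hj
      have htw : (g.drop j).takeWhile (fun y => y ≠ 0)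
          = g[j] :: (g.drop (j + 1)).takeWhile (fun y => y ≠ 0) := by
        rw [hdrop, List.takeWhile_cons, if_pos (by rw [hget] at hv; simpa using hv)]
      rw [pvCollect_eq g (j + 1) (acc ++ [g.getD j 0]), htw, hget]
      simp only [List.length_cons, List.append_assoc, List.singleton_append, Prod.mk.injEq]
      exact ⟨trivial, by omega⟩
  · next h =>
      have htw : (g.drop j).takeWhile (fun y => y ≠ 0) = [] := by
        by_cases hj : j < g.length
        · have hv : g.getD j 0 = 0 := by
            by_contra hc; exact h ⟨hj, hc⟩
          have hget : g.getD j 0 = g[j] := List.getD_eq_getElem g 0 hj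
          have hv' : g[j] = 0 := by rw [← hget]; exact hv
          rw [List.drop_eq_getElem_cons hj, List.takeWhile_cons, if_neg (by simp [hv'])]
        · rw [List.drop_eq_nil_of_le (by omega), List.takeWhile_nil]
      rw [htw]
      simp
termination_by g.length - j
decreasing_by omega

theorem takeWhile_as_take (l : List Int) (p : Int → Bool) :
    l.take (l.takeWhile p).length = l.takeWhile p := by
  calc l.take (l.takeWhile p).length
      = (l.takeWhile p ++ l.dropWhile p).take (l.takeWhile p).length := by
        rw [List.takeWhile_append_dropWhile]
    _ = l.takeWhile p := List.take_left

theorem dropWhile_as_drop (l : List Int) (p : Int → Bool) :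
    l.dropWhile p = l.drop (l.takeWhile p).length := by
  calc l.dropWhile p
      = (l.takeWhile p ++ l.dropWhile p).drop (l.takeWhile p).length := List.drop_left.symm
    _ = l.drop (l.takeWhile p).length := by rw [List.takeWhile_append_dropWhile]

theorem seg_getD (g : List Int) (a k m : Nat) (h1 : k < m) :
    ((g.drop a).take m).getD k 0 = g.getD (a + k) 0 := by
  simp [List.getD_eq_getElem?_getD, List.getElem?_drop, h1]

theorem pvScan_core_facts (g : List Int) (x : Nat) (hlt : x < g.length)
    (hnz : g.getD x 0 ≠ 0) (hguard : x + 1 < g.length ∧ g.getD (x + 1) 0 ≠ 0) :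
    ∃ b : Nat, (pvCollect g (x + 1) [g.getD x 0]).2 = b ∧ x + 2 ≤ b ∧ b ≤ g.length ∧
      runsL (g.drop x) x = (x, b) :: runsL (g.drop b) b ∧
      (g.drop x).take (b - x) = g[x] :: (g.drop (x + 1)).takeWhile (fun y => y ≠ 0) ∧
      (pvCollect g (x + 1) [g.getD x 0]).1 = g[x] :: (g.drop (x + 1)).takeWhile (fun y => y ≠ 0) ∧
      pvGood (g[x] :: (g.drop (x + 1)).takeWhile (fun y => y ≠ 0)) = pvGoodRun g (x, b) := by
  have hget : g.getD x 0 = g[x] := List.getD_eq_getElem g 0 hlt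
  have hx0 : ¬ (g[x] = 0) := by rw [← hget]; exact hnz
  obtain ⟨hx1, hnz1⟩ := hguard
  have hget1 : g.getD (x + 1) 0 = g[x + 1] := List.getD_eq_getElem g 0 hx1
  have hx10 : ¬ (g[x + 1] = 0) := by rw [← hget1]; exact hnz1
  set t := (g.drop (x + 1)).takeWhile (fun y => y ≠ 0) with ht_def
  set b := x + 1 + t.length with hb_def
  have hdropx : g.drop x = g[x] :: g.drop (x + 1) := List.drop_eq_getElem_cons hlt
  have hdropx1 : g.drop (x + 1) = g[x + 1] :: g.drop (x + 2) := List.drop_eq_getElem_cons hx1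
  have ht_cons : t = g[x + 1] :: (g.drop (x + 2)).takeWhile (fun y => y ≠ 0) := by
    rw [ht_def, hdropx1, List.takeWhile_cons, if_pos (by simp [hx10])]
  have ht_len1 : 1 ≤ t.length := by rw [ht_cons]; simp
  have ht_le : t.length ≤ g.length - (x + 1) := by
    have h := takeWhile_dropWhile_len (g.drop (x + 1)) (fun y => y ≠ 0)
    rw [← ht_def] at h
    have hld : (g.drop (x + 1)).length = g.length - (x + 1) := List.length_drop
    omega
  have hb2 : x + 2 ≤ b := by omega
  have hbn : b ≤ g.length := by omega
  have hdw : (g.drop (x + 1)).dropWhile (fun y => y ≠ 0) = g.drop b := by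
    rw [dropWhile_as_drop, ← ht_def, List.drop_drop]
  have hruns : runsL (g.drop x) x = (x, b) :: runsL (g.drop b) b := by
    rw [hdropx, runsL, if_neg hx0, ← ht_def, hdw]
  have hcolors : (g.drop x).take (b - x) = g[x] :: t := by
    rw [hdropx, show b - x = t.length + 1 by omega, List.take_succ_cons, ht_def,
      takeWhile_as_take]
  have hcol : (pvCollect g (x + 1) [g.getD x 0]).1 = g[x] :: t := by
    rw [pvCollect_eq, ← ht_def, hget]
    simp
  have hcol2 : (pvCollect g (x + 1) [g.getD x 0]).2 = b := by
    rw [pvCollect_eq, ← ht_def]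
  have hclen : (g[x] :: t).length = b - x := by simp; omega
  have ea : (g[x] :: t).getD 0 0 = g.getD x 0 := by
    rw [hget, List.getD_cons_zero]
  have eb : (g[x] :: t).getD 1 0 = g.getD (x + 1) 0 := by
    rw [ht_cons, hget1, List.getD_cons_succ, List.getD_cons_zero]
  have ec : (g[x] :: t).getD (b - x - 1) 0 = g.getD (b - 1) 0 := by
    rw [← hcolors, seg_getD g x (b - x - 1) (b - x) (by omega)]
    congr 1
    omega
  have ed : (g[x] :: t).getD (b - x - 2) 0 = g.getD (b - 2) 0 := by
    rw [← hcolors, seg_getD g x (b - x - 2) (b - x) (by omega)]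
    congr 1
    omega
  have hgood_eq : pvGood (g[x] :: t) = pvGoodRun g (x, b) := by
    rw [pvGood, pvGoodRun, hclen, ea, eb, ec, ed]
  exact ⟨b, hcol2, hb2, hbn, hruns, hcolors, hcol, hgood_eq⟩

theorem pvScan_eq (g : List Int) (i : Nat) :
    pvScan g i = ((runsL (g.drop i) i).find? (pvGoodRun g)).map
      (fun r => (r.1, (g.drop r.1).take (r.2 - r.1))) := by
  induction i using pvScan.induct g with
  | case1 x hlt hnz hguard r hgood =>
      obtain ⟨b, hb_def, hb2, hbn, hruns, hcolors, hrw, hgood_eq⟩ :=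
        pvScan_core_facts g x hlt hnz hguard
      have hgood' : pvGood (pvCollect g (x + 1) [g.getD x 0]).1 = true := hgood
      rw [hrw] at hgood'
      rw [pvScan, dif_pos hlt, if_pos hnz, if_pos hguard, hruns,
        List.find?_cons_of_pos (by rw [← hgood_eq]; exact hgood')]
      show (if pvGood (pvCollect g (x + 1) [g.getD x 0]).1 = true
          then some (x, (pvCollect g (x + 1) [g.getD x 0]).1)
          else pvScan g (pvCollect g (x + 1) [g.getD x 0]).2) = _
      rw [hrw, if_pos hgood']
      simp only [Option.map_some]
      rw [hcolors]
  | case2 x hlt hnz hguard r hgood ih =>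
      obtain ⟨b, hb_def, hb2, hbn, hruns, hcolors, hrw, hgood_eq⟩ :=
        pvScan_core_facts g x hlt hnz hguard
      have hgood' : ¬ pvGood (pvCollect g (x + 1) [g.getD x 0]).1 = true := hgood
      rw [hrw] at hgood'
      rw [hb_def] at ih
      rw [pvScan, dif_pos hlt, if_pos hnz, if_pos hguard, hruns,
        List.find?_cons_of_neg (by rw [← hgood_eq]; exact hgood')]
      show (if pvGood (pvCollect g (x + 1) [g.getD x 0]).1 = true
          then some (x, (pvCollect g (x + 1) [g.getD x 0]).1)
          else pvScan g (pvCollect g (x + 1) [g.getD x 0]).2) = _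
      rw [hrw, if_neg hgood', hb_def]
      exact ih
  | case3 x hlt hnz hguard ih =>
      have hget : g.getD x 0 = g[x] := List.getD_eq_getElem g 0 hlt
      have hx0 : ¬ (g[x] = 0) := by rw [← hget]; exact hnz
      have hdropx : g.drop x = g[x] :: g.drop (x + 1) := List.drop_eq_getElem_cons hlt
      have ht : (g.drop (x + 1)).takeWhile (fun y => y ≠ 0) = [] := by
        by_cases hx1 : x + 1 < g.length
        · have hv : g.getD (x + 1) 0 = 0 := by
            by_contra hc; exact hguard ⟨hx1, hc⟩
          have hget1 : g.getD (x + 1) 0 = g[x + 1] := List.getD_eq_getElem g 0 hx1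
          have hv' : g[x + 1] = 0 := by rw [← hget1]; exact hv
          rw [List.drop_eq_getElem_cons hx1, List.takeWhile_cons, if_neg (by simp [hv'])]
        · rw [List.drop_eq_nil_of_le (by omega), List.takeWhile_nil]
      have hruns : runsL (g.drop x) x
          = (x, x + 1) :: runsL (g.drop (x + 1)) (x + 1) := by
        rw [hdropx, runsL, if_neg hx0, ht, dropWhile_as_drop, ht]
        simp
      rw [pvScan, dif_pos hlt, if_pos hnz, if_neg hguard, hruns,
        List.find?_cons_of_neg (by simp [pvGoodRun])]
      exact ih
  | case4 x hlt hz ih =>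
      have hget : g.getD x 0 = g[x] := List.getD_eq_getElem g 0 hlt
      have hx0 : g[x] = 0 := by rw [← hget]; simpa using hz
      have hdropx : g.drop x = g[x] :: g.drop (x + 1) := List.drop_eq_getElem_cons hlt
      rw [pvScan, dif_pos hlt, if_neg hz, hdropx, runsL, if_pos hx0]
      exact ih
  | case5 x hge =>
      rw [pvScan, dif_neg hge, List.drop_eq_nil_of_le (by omega)]
      simp [runsL]

theorem pvWrite_eq (cs : List Int) : ∀ (out : List Int) (a : Nat), a + cs.length ≤ out.length →
    pvWrite out a cs = out.take a ++ cs ++ out.drop (a + cs.length) := by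
  induction cs with
  | nil => intro out a h; simp [pvWrite]
  | cons c cs ih =>
      intro out a h
      simp only [List.length_cons] at h
      have ha : a < out.length := by omega
      have hset : out.set a c = out.take a ++ c :: out.drop (a + 1) := by
        rw [List.set_eq_take_append_cons_drop, if_pos ha]
      rw [pvWrite, ih (out.set a c) (a + 1) (by simp; omega), hset]
      have hlt : a ≤ (out.take a ++ c :: out.drop (a + 1)).length := by
        simp; omega
      have htk : (out.take a ++ c :: out.drop (a + 1)).take (a + 1)
          = out.take a ++ [c] := by
        rw [List.take_append]
        have h1 : (out.take a).length = a := List.length_take_of_le (le_of_lt ha)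
        rw [List.take_of_length_le (by omega), h1]
        simp
      have h1 : (out.take a).length = a := List.length_take_of_le (le_of_lt ha)
      have hdr : (out.take a ++ c :: out.drop (a + 1)).drop (a + 1 + cs.length)
          = out.drop (a + (cs.length + 1)) := by
        rw [List.drop_append, List.drop_eq_nil_of_le (by rw [h1]; omega), h1,
          List.nil_append, show a + 1 + cs.length - a = cs.length + 1 by omega,
          List.drop_succ_cons, List.drop_drop]
        congr 1
        omega
      rw [htk, hdr]
      simp

theorem transform_eq_alt (g : List Int) :
    transform_reflect_block_with_border_pixel g
      = transform_reflect_block_with_border_pixel_alt g := by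
  have hscan := pvScan_eq g 0
  rw [List.drop_zero] at hscan
  rw [transform_reflect_block_with_border_pixel,
    transform_reflect_block_with_border_pixel_alt, pvRuns_eq, hscan]
  cases hfind : (runsL g 0).find? (pvGoodRun g) with
  | none => rfl
  | some r =>
      rcases r with ⟨a, b⟩
      simp only [Option.map_some]
      obtain ⟨-, hab, hbn⟩ := runsL_bounds g 0 (a, b) (List.mem_of_find?_eq_some hfind)
      have hlen : ((g.drop a).take (b - a)).length = b - a := by
        simp only [List.length_take, List.length_drop]
        omega
      show pvWrite g a ((g.drop a).take (b - a)).reverse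
          = g.take a ++ ((g.drop a).take (b - a)).reverse ++ g.drop b
      rw [pvWrite_eq _ g a (by rw [List.length_reverse, hlen]; omega),
        List.length_reverse, hlen, show a + (b - a) = b by omega]

-- ===== VERDICT (by name: the statement is the Claim_ definition above) =====
theorem transform_reflect_block_with_border_pixel_spec : Claim_equal_transform_reflect_block_with_border_pixel := by
  intro g _hdom
  unfold Spec_transform_reflect_block_with_border_pixel
  exact transform_eq_alt g
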